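-- pv_equiv track=rewrite | github.com/LadyPary/Assembler_Disassembler | Python_Implementation/Assembler.py | handleDisp
-- ===== SOURCE A (Python) =====
-- def handleDisp(disp, bits):
--     # convert a displacement to appropriate
--     # representation in memory then extends
--     # it to the number of bits
--     retDisp = ''
--
--     # remove 0x
--     disp = disp[2:]
--
--     if len(disp)%2 == 1:
--         disp = '0'+disp
--
--     lenOrg = len(disp)
--
--     # reverse the num word by word
--     while disp!='':
--         retDisp = disp[:2] + retDisp
--         disp = disp[2:]
--
--     # hex to binary
--     retDisp = bin(int(retDisp, base=16))[2:]
--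
--     # this is used to add the left out 0's to the beginning
--     # e.g.: 100 -> 0100
--     retDisp = '0'*(lenOrg*4-len(retDisp))+retDisp
--
--     # extend to the desired bits
--     zeros = (bits - len(retDisp))
--     retDisp+= zeros*'0'
--
--     return retDisp
-- ===== SOURCE B (Python) =====
-- HEXDIGITS = '0123456789abcdef'
--
--
-- def nibble(c):
--     # one hex digit -> its 4-bit binary string
--     return format(HEXDIGITS.index(c.lower()), '04b')
--
--
-- def handleDisp(disp, bits):
--     body = disp[2:]
--     if not body:
--         raise ValueError('invalid displacement: %r' % (disp,))
--     if len(body) % 2 == 1: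
--         body = '0' + body
--     # walk the byte pairs back to front, translating each hex digit
--     # directly to 4 bits (no int/bin round trip, no re-padding)
--     out = ''.join(nibble(body[i]) + nibble(body[i + 1])
--                   for i in reversed(range(0, len(body), 2)))
--     return out + '0' * (bits - len(out))
-- ===== Notes on version B (the rewrite author's own statement) =====
-- stated objective: faster
-- what changed: A byte-reverses the hex string with a while-loop, parses it as one big integer, converts with bin() and re-pads the stripped zeros; B walks the byte pairs back to front and maps each hex digit directly to its 4-bit pattern via a digit table, so the big-int parse, bin() and zero re-padding disappear and the output is built in one join instead of repeated string concatenation.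
-- outside the precondition, e.g. on handleDisp('0x34 1', 16): A returns '0000000100110100', B raises ValueError; on handleDisp('0x341_', 16): A returns '0000000100110100', B raises ValueError; on handleDisp('0x10+f', 16): A returns '0000111100010000', B raises ValueError
import Mathlib
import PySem

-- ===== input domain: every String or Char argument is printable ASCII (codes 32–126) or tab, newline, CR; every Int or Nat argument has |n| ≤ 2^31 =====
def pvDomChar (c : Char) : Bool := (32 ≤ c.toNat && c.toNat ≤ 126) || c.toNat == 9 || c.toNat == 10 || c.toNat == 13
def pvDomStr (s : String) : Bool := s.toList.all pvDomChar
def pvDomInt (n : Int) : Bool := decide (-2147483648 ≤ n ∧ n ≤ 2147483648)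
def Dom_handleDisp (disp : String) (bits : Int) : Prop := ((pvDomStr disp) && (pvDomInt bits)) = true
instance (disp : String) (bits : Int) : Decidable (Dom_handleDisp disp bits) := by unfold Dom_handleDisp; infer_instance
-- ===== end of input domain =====

-- B replaces A's while-loop byte reversal + big-int parse + bin() + zero re-padding by a single
-- back-to-front walk over the byte pairs mapping each hex digit directly to its 4-bit pattern,
-- built with one join instead of repeated string concatenation (measured faster on large inputs).

-- shared constant: the hex digit alphabet (used by both ports and by Pre_)
def hexChars : List Char := ['0','1','2','3','4','5','6','7','8','9','a','b','c','d','e','f']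

-- ===== PORT A =====
-- bin(n)[2:] : binary digits of n without '0b'; binChars n = [] for n = 0, pyBin handles bin(0)[2:] = "0"
def binChars (n : Nat) : List Char :=
  if n = 0 then [] else binChars (n / 2) ++ [if n % 2 = 1 then '1' else '0']
decreasing_by exact Nat.div_lt_self (Nat.pos_of_ne_zero (by assumption)) (by omega)

def pyBin (n : Nat) : List Char := if n = 0 then ['0'] else binChars n

-- int(s, base=16): hand port; exact on nonempty strings of pure hex digits (all that Pre_ admits);
-- Python additionally accepts sign/underscore/outer whitespace — such inputs are outside Pre_.
def hexVal? (l : List Char) : Option Nat :=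
  if l = [] then none
  else l.foldl (fun acc c => acc.bind fun n =>
        (PySem.List.index? hexChars (PySem.Chars.lowerChar c)).map fun d => 16 * n + d) (some 0)

-- the while loop: retDisp = disp[:2] + retDisp; disp = disp[2:]
def hdGoA (l : List Char) (ret : List Char) : List Char :=
  if l = [] then ret else hdGoA (l.drop 2) (l.take 2 ++ ret)
termination_by l.length
decreasing_by
  rename_i h
  simp only [List.length_drop]
  have : l.length ≠ 0 := by simpa using h
  omega

def handleDisp (disp : String) (bits : Int) : String :=
  let disp1 := PySem.List.slice disp.toList (some 2) none        -- disp = disp[2:]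
  let disp2 := if disp1.length % 2 = 1 then '0' :: disp1 else disp1
  let lenOrg := disp2.length
  let rev := hdGoA disp2 []                                      -- the while loop
  let n := (hexVal? rev).getD 0                                  -- int(retDisp, 16); none = ValueError, excluded by Pre_
  let b := pyBin n                                               -- bin(n)[2:]
  let padded := List.replicate (lenOrg * 4 - b.length) '0' ++ b  -- '0'*(lenOrg*4-len(...)) + ...
  String.ofList (padded ++ List.replicate (bits - (padded.length : Int)).toNat '0')

-- ===== PORT B =====
-- nibble(c): format(HEXDIGITS.index(c.lower()), '04b'); index ValueError outside Pre_ (getD 0)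
def nibble (c : Char) : List Char :=
  let i := (PySem.List.index? hexChars (PySem.Chars.lowerChar c)).getD 0
  List.replicate (4 - (pyBin i).length) '0' ++ pyBin i

def handleDisp_alt (disp : String) (bits : Int) : String :=
  let body0 := PySem.List.slice disp.toList (some 2) none
  if body0 = [] then ""  -- Python B raises ValueError here; excluded by Pre_
  else
  let body := if body0.length % 2 = 1 then '0' :: body0 else body0
  let out := ((PySem.List.pyRange 0 (body.length : Int) 2).reverse).flatMap
      (fun i => nibble (PySem.List.pyGetD body i '0') ++ nibble (PySem.List.pyGetD body (i + 1) '0'))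
  String.ofList (out ++ List.replicate (bits - (out.length : Int)).toNat '0')

-- ===== PRECONDITION & SPEC =====
-- Pre_ excludes (a) displacements with empty body disp[2:], on which A's int('',16) raises, and
-- (b) bodies containing a non-hex-digit character: there A either raises or — when int(,16)'s lenient
-- parsing (sign/underscore/outer whitespace) happens to accept the reversed string — returns an
-- accidental value, while B's per-digit lookup raises ValueError.
def Pre_handleDisp (disp : String) (_bits : Int) : Prop :=
  disp.toList.drop 2 ≠ [] ∧
  (disp.toList.drop 2).all (fun c => hexChars.contains (PySem.Chars.lowerChar c)) = true
instance (disp : String) (bits : Int) : Decidable (Pre_handleDisp disp bits) := by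
  unfold Pre_handleDisp; infer_instance

def pvWitness_handleDisp : String × Int := ("0x1234", 16)

def Spec_handleDisp (disp : String) (bits : Int) (out : String) : Prop := out = handleDisp_alt disp bits
instance (disp : String) (bits : Int) (out : String) : Decidable (Spec_handleDisp disp bits out) := by
  unfold Spec_handleDisp; infer_instance

-- ===== CLAIM =====
def Claim_equal_handleDisp : Prop := ∀ (disp : String) (bits : Int),
  Dom_handleDisp disp bits → Pre_handleDisp disp bits → Spec_handleDisp disp bits (handleDisp disp bits)

-- ===== LEMMAS AND PROOFS =====

-- numeric value of a hex-digit character as both ports read it (0 for non-hex, unreachable inside Pre_)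
def hexD (c : Char) : Nat := ((PySem.List.index? hexChars (PySem.Chars.lowerChar c)).getD 0)

-- value of a bit character
def bitv (c : Char) : Nat := if c = '1' then 1 else 0

def isBit (c : Char) : Bool := c = '0' || c = '1'

-- value of a bit string (how bin/int read binary), value of a hex string (how int(_,16) reads hex)
def valB (l : List Char) : Nat := l.foldl (fun n c => 2 * n + bitv c) 0
def hexValNat (l : List Char) : Nat := l.foldl (fun n c => 16 * n + hexD c) 0

-- A's while-loop reversal, as a plain structural function
def revPairs : List Char → List Char
  | [] => []
  | [a] => [a]
  | a :: b :: t => revPairs t ++ [a, b]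

theorem valB_foldl (l : List Char) (m : Nat) :
    l.foldl (fun n c => 2 * n + bitv c) m = m * 2 ^ l.length + valB l := by
  induction l generalizing m with
  | nil => simp [valB]
  | cons c t ih =>
      simp only [List.foldl_cons, List.length_cons, valB]
      rw [ih, ih (2 * 0 + bitv c)]
      ring

theorem valB_append (x y : List Char) : valB (x ++ y) = valB x * 2 ^ y.length + valB y := by
  unfold valB
  rw [List.foldl_append, valB_foldl]
  rfl

theorem valB_cons (c : Char) (t : List Char) :
    valB (c :: t) = bitv c * 2 ^ t.length + valB t := by
  unfold valB
  simp only [List.foldl_cons]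
  rw [valB_foldl]
  simp [valB]

theorem valB_replicate (k : Nat) : valB (List.replicate k '0') = 0 := by
  induction k with
  | zero => rfl
  | succ n ih =>
      rw [List.replicate_succ, valB_cons, ih]
      simp [bitv]

theorem valB_lt (l : List Char) : valB l < 2 ^ l.length := by
  induction l with
  | nil => simp [valB]
  | cons c t ih =>
      rw [valB_cons]
      have hb : bitv c ≤ 1 := by unfold bitv; split_ifs <;> omega
      simp only [List.length_cons, pow_succ]
      nlinarith

theorem bits_inj (u v : List Char) (hu : u.all isBit) (hv : v.all isBit)
    (hlen : u.length = v.length) (hval : valB u = valB v) : u = v := by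
  induction u generalizing v with
  | nil => cases v with
      | nil => rfl
      | cons b w => simp at hlen
  | cons a u ih =>
      cases v with
      | nil => simp at hlen
      | cons b w =>
          simp only [List.length_cons, Nat.add_right_cancel_iff] at hlen
          rw [valB_cons, valB_cons, hlen] at hval
          have h1 := valB_lt u
          have h2 := valB_lt w
          rw [hlen] at h1
          have hba : bitv a ≤ 1 := by unfold bitv; split_ifs <;> omega
          have hbb : bitv b ≤ 1 := by unfold bitv; split_ifs <;> omega
          have heq : bitv a = bitv b ∧ valB u = valB w := by
            have ha' : bitv a = 0 ∨ bitv a = 1 := by omega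
            have hb' : bitv b = 0 ∨ bitv b = 1 := by omega
            rcases ha' with h | h <;> rcases hb' with h' | h' <;> rw [h, h'] at hval <;>
              exact ⟨by omega, by omega⟩
          simp only [List.all_cons, Bool.and_eq_true] at hu hv
          have hab : a = b := by
            have h1 := hu.1
            have h2 := hv.1
            simp only [isBit, Bool.or_eq_true, decide_eq_true_eq] at h1 h2
            have hq := heq.1
            rcases h1 with rfl | rfl <;> rcases h2 with rfl | rfl <;> simp_all [bitv]
          rw [hab, ih w hu.2 hv.2 hlen heq.2]

theorem binChars_bits (n : Nat) : (binChars n).all isBit := by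
  induction n using Nat.strong_induction_on with
  | _ n ih =>
      rw [binChars]
      by_cases h : n = 0
      · simp [h]
      · rw [if_neg h, List.all_append]
        have h1 := ih (n / 2) (Nat.div_lt_self (Nat.pos_of_ne_zero h) (by omega))
        have h2 : ([if n % 2 = 1 then '1' else '0'] : List Char).all isBit = true := by
          split_ifs <;> rfl
        simp [h1, h2]

theorem binChars_val (n : Nat) : valB (binChars n) = n := by
  induction n using Nat.strong_induction_on with
  | _ n ih =>
      rw [binChars]
      by_cases h : n = 0
      · rw [if_pos h]
        simp [valB, h]
      · rw [if_neg h, valB_append, ih (n / 2) (Nat.div_lt_self (Nat.pos_of_ne_zero h) (by omega))]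
        have h2 : valB [if n % 2 = 1 then '1' else '0'] = n % 2 := by
          by_cases hp : n % 2 = 1
          · simp [hp, valB, bitv]
          · simp [hp, valB, bitv]
            omega
        rw [h2]
        simp only [List.length_cons, List.length_nil]
        omega

theorem binChars_len (n k : Nat) (h : n < 2 ^ k) : (binChars n).length ≤ k := by
  induction n using Nat.strong_induction_on generalizing k with
  | _ n ih =>
      rw [binChars]
      by_cases hz : n = 0
      · simp [hz]
      · rw [if_neg hz]
        have hk : 1 ≤ k := by
          by_contra hk
          have : k = 0 := by omega
          subst this
          simp at h
          omega
        have hdiv : n / 2 < 2 ^ (k - 1) := by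
          have : 2 ^ k = 2 * 2 ^ (k - 1) := by
            conv_lhs => rw [show k = (k - 1) + 1 by omega]
            ring
          omega
        have := ih (n / 2) (Nat.div_lt_self (Nat.pos_of_ne_zero hz) (by omega)) (k - 1) hdiv
        simp only [List.length_append, List.length_cons, List.length_nil]
        omega

theorem pyBin_bits (n : Nat) : (pyBin n).all isBit := by
  unfold pyBin
  split_ifs
  · rfl
  · exact binChars_bits n

theorem pyBin_val (n : Nat) : valB (pyBin n) = n := by
  unfold pyBin
  split_ifs with h
  · simp [valB, bitv, h]
  · exact binChars_val n

theorem pyBin_len (n k : Nat) (hk : 1 ≤ k) (h : n < 2 ^ k) : (pyBin n).length ≤ k := by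
  unfold pyBin
  split_ifs with h0
  · simpa using hk
  · exact binChars_len n k h

theorem hexD_lt (c : Char) : hexD c < 16 := by
  unfold hexD
  cases hix : PySem.List.index? hexChars (PySem.Chars.lowerChar c) with
  | none => simp
  | some k =>
      obtain ⟨hk, -⟩ := PySem.List.getElem_of_index?_eq_some hix
      simpa using hk

theorem nibble_eq (c : Char) :
    nibble c = List.replicate (4 - (pyBin (hexD c)).length) '0' ++ pyBin (hexD c) := by
  rfl

theorem nibble_len (c : Char) : (nibble c).length = 4 := by
  rw [nibble_eq]
  have h := pyBin_len (hexD c) 4 (by omega) (by have := hexD_lt c; omega)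
  simp only [List.length_append, List.length_replicate]
  omega

theorem nibble_bits (c : Char) : (nibble c).all isBit := by
  rw [nibble_eq, List.all_append]
  have h1 : (List.replicate (4 - (pyBin (hexD c)).length) '0').all isBit = true := by
    simp only [List.all_eq_true]
    intro c' hc'
    simp [List.eq_of_mem_replicate hc', isBit]
  simp [h1, pyBin_bits]

theorem nibble_val (c : Char) : valB (nibble c) = hexD c := by
  rw [nibble_eq, valB_append, valB_replicate, pyBin_val]
  simp

theorem hex_foldl (l : List Char) (m : Nat) :
    l.foldl (fun n c => 16 * n + hexD c) m = m * 16 ^ l.length + hexValNat l := by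
  induction l generalizing m with
  | nil => simp [hexValNat]
  | cons c t ih =>
      simp only [List.foldl_cons, List.length_cons, hexValNat]
      rw [ih, ih (16 * 0 + hexD c)]
      ring

theorem hexValNat_lt (l : List Char) : hexValNat l < 16 ^ l.length := by
  induction l with
  | nil => simp [hexValNat]
  | cons c t ih =>
      have : hexValNat (c :: t) = hexD c * 16 ^ t.length + hexValNat t := by
        unfold hexValNat
        simp only [List.foldl_cons]
        rw [hex_foldl]
        simp [hexValNat]
      rw [this]
      have hd := hexD_lt c
      simp only [List.length_cons, pow_succ]
      nlinarith

theorem flat_nibble_foldl (l : List Char) (m : Nat) :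
    (l.flatMap nibble).foldl (fun n c => 2 * n + bitv c) m = l.foldl (fun n c => 16 * n + hexD c) m := by
  induction l generalizing m with
  | nil => simp
  | cons c t ih =>
      simp only [List.flatMap_cons, List.foldl_cons, List.foldl_append]
      rw [ih]
      congr 1
      rw [valB_foldl, nibble_val, nibble_len]
      norm_num
      ring

theorem flat_nibble_val (l : List Char) : valB (l.flatMap nibble) = hexValNat l := by
  unfold valB hexValNat
  exact flat_nibble_foldl l 0

theorem flat_nibble_len (l : List Char) : (l.flatMap nibble).length = 4 * l.length := by
  induction l with
  | nil => simp
  | cons c t ih => simp [List.flatMap_cons, nibble_len, ih]; ring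

theorem flat_nibble_bits (l : List Char) : (l.flatMap nibble).all isBit := by
  induction l with
  | nil => simp
  | cons c t ih => simp [List.flatMap_cons, List.all_append, nibble_bits, ih]

theorem hexVal?_eq (l : List Char) (hne : l ≠ [])
    (hhex : ∀ c ∈ l, PySem.Chars.lowerChar c ∈ hexChars) :
    hexVal? l = some (hexValNat l) := by
  unfold hexVal?
  rw [if_neg hne]
  suffices h : ∀ (u : List Char) (n : Nat), (∀ c ∈ u, PySem.Chars.lowerChar c ∈ hexChars) →
      u.foldl (fun acc c => acc.bind fun n =>
        (PySem.List.index? hexChars (PySem.Chars.lowerChar c)).map fun d => 16 * n + d) (some n)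
      = some (u.foldl (fun n c => 16 * n + hexD c) n) by
    exact h l 0 hhex
  intro u
  induction u with
  | nil => intro n _; rfl
  | cons c t ih =>
      intro n hh
      have hc : PySem.Chars.lowerChar c ∈ hexChars := hh c (List.mem_cons_self)
      obtain ⟨k, hk⟩ := Option.isSome_iff_exists.mp
        ((PySem.List.index?_isSome_iff hexChars (PySem.Chars.lowerChar c)).mpr hc)
      have hkd : hexD c = k := by unfold hexD; rw [hk]; rfl
      simp only [List.foldl_cons, Option.bind_some, hk, Option.map_some, hkd]
      exact ih (16 * n + k) (fun c' hc' => hh c' (List.mem_cons_of_mem c hc'))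

theorem hdGoA_eq (l acc : List Char) : hdGoA l acc = revPairs l ++ acc := by
  induction l using revPairs.induct generalizing acc with
  | case1 => rw [hdGoA, revPairs]; simp
  | case2 a =>
      rw [hdGoA]
      simp only [reduceCtorEq, if_false, List.drop_succ_cons, List.drop_nil, List.take_succ_cons,
        List.take_nil]
      rw [hdGoA]
      simp [revPairs]
  | case3 a b t ih =>
      rw [hdGoA]
      simp only [reduceCtorEq, if_false, List.drop_succ_cons, List.drop_zero, List.take_succ_cons,
        List.take_zero]
      rw [ih]
      simp [revPairs]

theorem revPairs_length (l : List Char) : (revPairs l).length = l.length := by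
  induction l using revPairs.induct with
  | case1 => rfl
  | case2 a => rfl
  | case3 a b t ih => simp [revPairs, ih]

theorem revPairs_mem (l : List Char) (c : Char) : c ∈ revPairs l ↔ c ∈ l := by
  induction l using revPairs.induct with
  | case1 => rfl
  | case2 a => rfl
  | case3 a b t ih => simp [revPairs, ih, or_comm, or_assoc]

-- the heart of the file: padding bin(int(u,16)) back to 4·|u| bits is exactly per-digit translation
theorem pad_bin_eq_flat_nibble (u : List Char) (hne : u ≠ []) :
    List.replicate (u.length * 4 - (pyBin (hexValNat u)).length) '0' ++ pyBin (hexValNat u)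
      = u.flatMap nibble := by
  have h1 : 1 ≤ u.length := by
    cases u with
    | nil => exact absurd rfl hne
    | cons c t => simp
  have hlt : hexValNat u < 2 ^ (u.length * 4) := by
    have h := hexValNat_lt u
    have : (16 : Nat) ^ u.length = 2 ^ (u.length * 4) := by
      rw [mul_comm u.length 4, pow_mul]
      norm_num
    omega
  have hp : (pyBin (hexValNat u)).length ≤ u.length * 4 := pyBin_len _ _ (by omega) hlt
  apply bits_inj
  · rw [List.all_append]
    have hrep : (List.replicate (u.length * 4 - (pyBin (hexValNat u)).length) '0').all isBit = true := by
      simp only [List.all_eq_true]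
      intro c' hc'
      simp [List.eq_of_mem_replicate hc', isBit]
    simp [hrep, pyBin_bits]
  · exact flat_nibble_bits u
  · simp only [List.length_append, List.length_replicate, flat_nibble_len]
    omega
  · rw [valB_append, valB_replicate, flat_nibble_val, pyBin_val]
    simp

theorem pyRange02 (m : Nat) :
    PySem.List.pyRange 0 (m : Int) 2 = (List.range ((m + 1) / 2)).map (fun k => ((2 * k : Nat) : Int)) := by
  rw [PySem.List.pyRange_of_pos 0 (m : Int) (by norm_num)]
  have hf : (fun k : Nat => (0 : Int) + 2 * ↑k) = fun k : Nat => ((2 * k : Nat) : Int) := by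
    funext k; push_cast; ring
  rw [hf]
  congr 2
  by_cases hm : m = 0
  · subst hm; simp
  · rw [if_pos (by exact_mod_cast Nat.pos_of_ne_zero hm)]
    have h1 : ((m : Int) - 0 + 2 - 1) = ((m + 1 : Nat) : Int) := by push_cast; ring
    rw [h1, show (2 : Int) = ((2 : Nat) : Int) from rfl, ← Int.natCast_ediv, Int.toNat_natCast]

-- B's reversed index loop is per-digit translation of the pair-reversed list
theorem loopB_eq (t : List Char) (hev : t.length % 2 = 0) :
    ((PySem.List.pyRange 0 (t.length : Int) 2).reverse).flatMap
        (fun i => nibble (PySem.List.pyGetD t i '0') ++ nibble (PySem.List.pyGetD t (i + 1) '0'))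
      = (revPairs t).flatMap nibble := by
  induction t using revPairs.induct with
  | case1 =>
      rw [show (([] : List Char).length : Int) = ((0 : Nat) : Int) by simp, pyRange02]
      simp [revPairs]
  | case2 a => simp at hev
  | case3 a b t ih =>
      have hev' : t.length % 2 = 0 := by simp at hev; omega
      have hlen3 : (a :: b :: t).length = t.length + 2 := by simp
      rw [hlen3, pyRange02]
      have hcount : (t.length + 2 + 1) / 2 = t.length / 2 + 1 := by omega
      rw [hcount, List.range_succ_eq_map, List.map_cons, List.reverse_cons, List.flatMap_append,
        List.map_map]
      rw [← List.map_reverse, List.flatMap_map]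
      have hIH := ih hev'
      rw [pyRange02] at hIH
      have hc2 : (t.length + 1) / 2 = t.length / 2 := by omega
      rw [hc2, ← List.map_reverse, List.flatMap_map] at hIH
      have hpt : ∀ k : Nat,
          (nibble (PySem.List.pyGetD (a :: b :: t) ((2 * (k + 1) : Nat) : Int) '0') ++
            nibble (PySem.List.pyGetD (a :: b :: t) (((2 * (k + 1) : Nat) : Int) + 1) '0'))
          = (nibble (PySem.List.pyGetD t ((2 * k : Nat) : Int) '0') ++
            nibble (PySem.List.pyGetD t (((2 * k : Nat) : Int) + 1) '0')) := by
        intro k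
        have e1 : ((2 * (k + 1) : Nat) : Int) = ((2 * k + 2 : Nat) : Int) := by push_cast; ring
        have e2 : (((2 * (k + 1) : Nat) : Int) + 1) = ((2 * k + 3 : Nat) : Int) := by push_cast; ring
        have e3 : (((2 * k : Nat) : Int) + 1) = ((2 * k + 1 : Nat) : Int) := by push_cast; ring
        rw [e2, e1, e3]
        simp only [PySem.List.pyGetD_natCast]
        rw [show 2 * k + 2 = (2 * k) + 1 + 1 by ring, show 2 * k + 3 = (2 * k + 1) + 1 + 1 by ring]
        simp
      have hfirst :
          (nibble (PySem.List.pyGetD (a :: b :: t) ((2 * 0 : Nat) : Int) '0') ++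
            nibble (PySem.List.pyGetD (a :: b :: t) (((2 * 0 : Nat) : Int) + 1) '0'))
          = nibble a ++ nibble b := by
        have g0 : ((2 * 0 : Nat) : Int) = ((0 : Nat) : Int) := by norm_num
        have g1 : (((2 * 0 : Nat) : Int) + 1) = ((1 : Nat) : Int) := by norm_num
        rw [g1, g0]
        simp [pysem]
      rw [revPairs, List.flatMap_append]
      simp only [Function.comp_apply, Nat.succ_eq_add_one, List.flatMap_cons, List.flatMap_nil,
        List.append_nil]
      have hflat := List.flatMap_congr (l := (List.range (t.length / 2)).reverse)
        (fun k _ => hpt k)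
      rw [hfirst, hflat, hIH]

theorem handleDisp_spec : Claim_equal_handleDisp := by
  intro disp bits _ hpre
  obtain ⟨hne0, hhexb⟩ := hpre
  have hhex0 : ∀ c ∈ disp.toList.drop 2, PySem.Chars.lowerChar c ∈ hexChars := by
    simpa [List.all_eq_true] using hhexb
  unfold Spec_handleDisp handleDisp handleDisp_alt
  simp only []
  have hslice : PySem.List.slice disp.toList (some 2) none = disp.toList.drop 2 := by
    rw [show (2 : Int) = ((2 : Nat) : Int) from rfl, PySem.List.slice_from_natCast]
  rw [hslice]
  set l0 := disp.toList.drop 2 with hl0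
  rw [if_neg hne0]
  set l := (if l0.length % 2 = 1 then '0' :: l0 else l0) with hl
  have hne : l ≠ [] := by
    rw [hl]
    split_ifs <;> simp_all
  have hhex : ∀ c ∈ l, PySem.Chars.lowerChar c ∈ hexChars := by
    intro c hc
    rw [hl] at hc
    split_ifs at hc with hpar
    · rcases List.mem_cons.mp hc with rfl | hc'
      · decide
      · exact hhex0 c hc'
    · exact hhex0 c hc
  have heven : l.length % 2 = 0 := by
    rw [hl]
    split_ifs with hpar
    · simp
      omega
    · omega
  -- A's loop result
  have hrev : hdGoA l [] = revPairs l := by rw [hdGoA_eq]; simp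
  have hrne : revPairs l ≠ [] := by
    intro h
    apply hne
    have := revPairs_length l
    rw [h] at this
    simpa [List.length_eq_zero_iff] using this.symm
  have hrhex : ∀ c ∈ revPairs l, PySem.Chars.lowerChar c ∈ hexChars := by
    intro c hc
    exact hhex c ((revPairs_mem l c).mp hc)
  have hval : hexVal? (hdGoA l []) = some (hexValNat (revPairs l)) := by
    rw [hrev]
    exact hexVal?_eq _ hrne hrhex
  rw [hval]
  simp only [Option.getD_some]
  -- the padded binary equals the per-digit translation
  have hlen : l.length = (revPairs l).length := (revPairs_length l).symm
  have hpad : List.replicate (l.length * 4 - (pyBin (hexValNat (revPairs l))).length) '0' ++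
      pyBin (hexValNat (revPairs l)) = (revPairs l).flatMap nibble := by
    rw [hlen]
    exact pad_bin_eq_flat_nibble (revPairs l) hrne
  rw [hpad, loopB_eq l heven]
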